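-- pv_equiv track=rewrite | github.com/andresgr96/sat-solver | solver/heuristics.py | moms_heuristic
-- ===== SOURCE A (Python) =====
-- from collections import defaultdict
-- from typing import List
--
-- def moms_heuristic(cnf: List[List[int]]) -> int:
--     """
--     Apply MOM's Heuristic (Maximum Occurrences in clauses of Minimum Size).
--
--     Args:
--         cnf (List[List[int]]): The CNF formula.
--
--     Returns:
--         int: The literal to assign.
--     """
--     min_size = float('inf')
--     literal_counts = defaultdict(int)
--
--     for clause in cnf:
--         if len(clause) < min_size:
--             min_size = len(clause)
--             literal_counts = defaultdict(int)
--         if len(clause) == min_size: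
--             for literal in clause:
--                 literal_counts[literal] += 1
--
--     return max(literal_counts, key=literal_counts.get)
-- ===== SOURCE B (Python) =====
-- from collections import Counter
-- from typing import List
--
-- def moms_heuristic(cnf: List[List[int]]) -> int:
--     min_size = min(len(clause) for clause in cnf)
--     counts = Counter(lit for clause in cnf if len(clause) == min_size for lit in clause)
--     return max(counts, key=counts.get)
-- ===== Notes on version B (the rewrite author's own statement) =====
-- stated objective: simpler
-- what changed: Replaces A's single fused loop that tracks a running minimum and resets the count dict with two clean passes: first min(len(clause) for clause in cnf), then a Counter over the literals of the min-size clauses only.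
import Mathlib
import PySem

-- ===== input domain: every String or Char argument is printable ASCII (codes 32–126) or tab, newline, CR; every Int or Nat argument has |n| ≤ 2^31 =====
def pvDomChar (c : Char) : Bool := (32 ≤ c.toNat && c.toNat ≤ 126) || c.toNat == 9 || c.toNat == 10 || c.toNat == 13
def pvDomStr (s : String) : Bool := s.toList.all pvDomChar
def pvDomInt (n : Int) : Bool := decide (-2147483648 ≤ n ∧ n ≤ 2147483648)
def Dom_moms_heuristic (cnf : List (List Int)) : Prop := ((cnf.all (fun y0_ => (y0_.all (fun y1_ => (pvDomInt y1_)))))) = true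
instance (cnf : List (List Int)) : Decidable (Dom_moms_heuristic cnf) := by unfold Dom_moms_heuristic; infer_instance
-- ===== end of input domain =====

-- B is simpler: two clean passes (min clause length, then count literals of min-size clauses)
-- instead of A's fused running-min-with-dict-reset loop; same Θ(total size) cost.

-- ===== PORT A =====
-- min_size is Option Nat: none models float('inf') (len < inf always true, len == inf always false)
def momsStep (st : Option Nat × PySem.Dict Int Int) (clause : List Int) :
    Option Nat × PySem.Dict Int Int :=
  let st1 := if (match st.1 with | none => true | some m => decide (clause.length < m)) = true
             then (some clause.length, PySem.Dict.empty) else st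
  if st1.1 = some clause.length
  then (st1.1, clause.foldl (fun d l => d.modify l 0 (· + 1)) st1.2)
  else st1

def moms_heuristic (cnf : List (List Int)) : Int :=
  let st := cnf.foldl momsStep (none, PySem.Dict.empty)
  (PySem.List.max? st.2.keys (fun k => st.2.getD k 0)).getD 0

-- ===== PORT B =====
def moms_heuristic_alt (cnf : List (List Int)) : Int :=
  match (cnf.map List.length).min? with
  | none => 0   -- unreachable under Pre_: min() of an empty generator raises in Python
  | some m =>
    let counts := PySem.Dict.counter ((cnf.filter (fun c => c.length == m)).flatMap (fun c => c))
    (PySem.List.max? counts.keys (fun k => counts.getD k 0)).getD 0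

-- ===== PRECONDITION & SPEC =====
-- Pre_ excludes exactly the inputs where A raises ValueError (and B does too): the empty cnf
-- and a cnf containing an empty clause, where max() is applied to an empty dict.
def Pre_moms_heuristic (cnf : List (List Int)) : Prop := cnf ≠ [] ∧ ∀ c ∈ cnf, c ≠ []
instance (cnf : List (List Int)) : Decidable (Pre_moms_heuristic cnf) := by
  unfold Pre_moms_heuristic; infer_instance

def pvWitness_moms_heuristic : List (List Int) := [[1, -2], [2], [-1, 2]]

def Spec_moms_heuristic (cnf : List (List Int)) (out : Int) : Prop := out = moms_heuristic_alt cnf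
instance (cnf : List (List Int)) (out : Int) : Decidable (Spec_moms_heuristic cnf out) := by
  unfold Spec_moms_heuristic; infer_instance

-- ===== CLAIM (what is proved, stated in full; the proofs are below) =====
def Claim_equal_moms_heuristic : Prop := ∀ (cnf : List (List Int)), Dom_moms_heuristic cnf → Pre_moms_heuristic cnf → Spec_moms_heuristic cnf (moms_heuristic cnf)

-- ===== LEMMAS AND PROOFS =====

-- counting a further block of literals on top of an existing counter is the counter of the concatenation
lemma counter_append (l c : List Int) :
    c.foldl (fun d l => d.modify l 0 (· + 1)) (PySem.Dict.counter l)
      = PySem.Dict.counter (l ++ c) := by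
  simp [PySem.Dict.counter_eq_foldl, List.foldl_append]

-- A's fold is characterized by the minimum clause length m: its state after the whole loop is
-- (some m, counter of the literals of the min-size clauses, in order).
lemma moms_fold_char (cnf : List (List Int)) (m : Nat)
    (hmem : m ∈ cnf.map List.length) (hle : ∀ l ∈ cnf.map List.length, m ≤ l) :
    cnf.foldl momsStep (none, PySem.Dict.empty)
      = (some m,
         PySem.Dict.counter ((cnf.filter (fun c => c.length == m)).flatMap (fun c => c))) := by
  induction cnf using List.reverseRecOn generalizing m with
  | nil => simp at hmem
  | append_singleton xs c ih =>
    rw [List.foldl_append]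
    by_cases hxs : xs = []
    · subst hxs
      have hm : m = c.length := by simpa using hmem
      subst hm
      simp [momsStep, PySem.Dict.counter_eq_foldl]
    · obtain ⟨mx, hmx⟩ : ∃ mx, (xs.map List.length).min? = some mx := by
        cases hx : xs.map List.length with
        | nil => exact absurd (List.map_eq_nil_iff.mp hx) hxs
        | cons a t => exact ⟨_, List.min?_cons' ..⟩
      have hmxmem : mx ∈ xs.map List.length := List.min?_mem hmx
      have hmxle : ∀ b ∈ xs.map List.length, mx ≤ b :=
        fun b hb => (List.le_min?_iff hmx).mp le_rfl b hb
      have ihx := ih mx hmxmem hmxle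
      have hmc : m ≤ c.length := hle _ (by simp)
      by_cases hlt : c.length < mx
      · -- strictly smaller clause: dict is reset, only c counts
        have hm : m = c.length := by
          rcases (by simpa using hmem : (∃ a ∈ xs, a.length = m) ∨ m = c.length) with hm' | hm'
          · rcases hm' with ⟨a, ha, hlen⟩
            have := hmxle a.length (List.mem_map_of_mem ha); omega
          · omega
        subst hm
        have hfxs : xs.filter (fun c' => c'.length == c.length) = [] := by
          rw [List.filter_eq_nil_iff]
          intro a ha
          have := hmxle a.length (List.mem_map_of_mem ha)
          simp; omega
        rw [ihx]
        simp [momsStep, hlt, List.filter_append, hfxs, PySem.Dict.counter_eq_foldl]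
      · -- m = mx, no reset
        have hm : m = mx := by
          have h1 : m ≤ mx := by
            rcases List.mem_map.mp hmxmem with ⟨a, ha, hlen⟩
            have := hle a.length (List.mem_map_of_mem (List.mem_append_left _ ha)); omega
          have h2 : mx ≤ m := by
            rcases (by simpa using hmem : (∃ a ∈ xs, a.length = m) ∨ m = c.length) with hm' | hm'
            · rcases hm' with ⟨a, ha, hlen⟩
              have := hmxle a.length (List.mem_map_of_mem ha); omega
            · omega
          omega
        subst hm
        rw [ihx]
        by_cases heq : c.length = m
        · simp [momsStep, heq, List.filter_append, counter_append]
        · have heq' : ¬ m = c.length := fun h => heq h.symm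
          simp [momsStep, hlt, heq, heq', List.filter_append]

-- ===== VERDICT (by name: the statement is the Claim_ definition above) =====
theorem moms_heuristic_spec : Claim_equal_moms_heuristic := by
  intro cnf _ hpre
  unfold Spec_moms_heuristic
  obtain ⟨hne, _⟩ := hpre
  obtain ⟨m, hm⟩ : ∃ m, (cnf.map List.length).min? = some m := by
    cases hx : cnf.map List.length with
    | nil => exact absurd (List.map_eq_nil_iff.mp hx) hne
    | cons a t => exact ⟨_, List.min?_cons' ..⟩
  have hmem : m ∈ cnf.map List.length := List.min?_mem hm
  have hle : ∀ b ∈ cnf.map List.length, m ≤ b :=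
    fun b hb => (List.le_min?_iff hm).mp le_rfl b hb
  unfold moms_heuristic moms_heuristic_alt
  rw [hm, moms_fold_char cnf m hmem hle]
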